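-- pv_equiv track=rewrite | github.com/HeapOfPackrats/AoC2017 | day21b.py | getRulesHash
-- ===== SOURCE A (Python) =====
-- def getRulesHash(rules):
--     rulesHash = dict()
--     for i, rule in rules.items():
--         patternHash = [row.count("#") for row in rule["pattern"]]
--         patternHash = "".join(map(str, patternHash))
--         if patternHash not in rulesHash:
--             rulesHash.update({patternHash: [i]})
--         else:
--             rulesHash[patternHash].append(i)
--     return rulesHash
-- ===== SOURCE B (Python) =====
-- def getRulesHash(rules):
--     # materialize (signature, index) pairs, dedup signatures in first-occurrence
--     # order, then build each group with a filtering pass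
--     pairs = [("".join(str(row.count("#")) for row in rule["pattern"]), i)
--              for i, rule in rules.items()]
--     seen = []
--     for s, _ in pairs:
--         if s not in seen:
--             seen.append(s)
--     return {s: [i for t, i in pairs if t == s] for s in seen}
-- ===== Notes on version B (the rewrite author's own statement) =====
-- stated objective: alternative
-- what changed: B replaces A's incremental dict accumulation by a materialize-then-group strategy: it first builds the full (signature, index) pair list, then dedups the signatures in first-occurrence order, and finally assembles each group with a filtering comprehension over the pair list.
import Mathlib
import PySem

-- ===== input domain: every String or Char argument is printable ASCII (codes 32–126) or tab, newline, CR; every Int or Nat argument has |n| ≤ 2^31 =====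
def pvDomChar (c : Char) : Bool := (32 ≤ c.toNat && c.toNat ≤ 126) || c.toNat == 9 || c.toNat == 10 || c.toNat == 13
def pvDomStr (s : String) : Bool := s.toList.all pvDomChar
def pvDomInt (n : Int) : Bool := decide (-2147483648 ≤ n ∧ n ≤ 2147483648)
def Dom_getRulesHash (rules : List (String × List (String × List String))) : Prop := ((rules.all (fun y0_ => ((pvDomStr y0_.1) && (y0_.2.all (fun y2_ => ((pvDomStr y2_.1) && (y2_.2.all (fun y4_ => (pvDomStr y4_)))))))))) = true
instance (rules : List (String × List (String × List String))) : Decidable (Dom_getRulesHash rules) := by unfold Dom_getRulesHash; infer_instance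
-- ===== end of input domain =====

-- B groups the rules by materializing the (signature, index) pair list, deduplicating the
-- signatures in first-occurrence order, and building each group by a filtering pass —
-- a different decomposition from A's incremental dict accumulation (objective: alternative).

-- shared helper: the signature ''.join(str(row.count('#')) for row in rule['pattern'])
-- (rule['pattern'] raises KeyError when missing; that case is excluded by Pre_, here .getD [])
def pvSig (rule : List (String × List String)) : String :=
  PySem.Str.join "" ((((PySem.Dict.mk rule).get? "pattern").getD []).map
    (fun row => PySem.Int.toStr ((PySem.Str.count row "#" : Nat) : Int)))

-- ===== PORT A =====
def getRulesHash (rules : List (String × List (String × List String))) : List (String × List String) :=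
  (rules.foldl (fun rulesHash p =>
      let patternHash := pvSig p.2
      if !(rulesHash.contains patternHash) then rulesHash.insert patternHash [p.1]
      else rulesHash.modify patternHash [] (fun l => l ++ [p.1]))
    (PySem.Dict.empty : PySem.Dict String (List String))).items

-- ===== PORT B =====
def getRulesHash_alt (rules : List (String × List (String × List String))) : List (String × List String) :=
  let pairs := rules.map (fun p => (pvSig p.2, p.1))
  let seen := pairs.foldl (fun acc q => if acc.contains q.1 then acc else acc ++ [q.1]) ([] : List String)
  seen.map (fun s => (s, (pairs.filter (fun q => q.1 == s)).map (fun q => q.2)))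

-- ===== PRECONDITION & SPEC =====
-- Pre_ excludes exactly the inputs where some rule dict has no "pattern" key: there the
-- Python A (and B) raises KeyError.
def Pre_getRulesHash (rules : List (String × List (String × List String))) : Prop :=
  ∀ p ∈ rules, "pattern" ∈ p.2.map Prod.fst
instance (rules : List (String × List (String × List String))) : Decidable (Pre_getRulesHash rules) := by unfold Pre_getRulesHash; infer_instance

def pvWitness_getRulesHash : (List (String × List (String × List String))) :=
  [("a", [("pattern", ["##.", "..."])]), ("b", [("pattern", ["#.#", ".#."])])]

def Spec_getRulesHash (rules : List (String × List (String × List String))) (out : List (String × List String)) : Prop := out = getRulesHash_alt rules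
instance (rules : List (String × List (String × List String))) (out : List (String × List String)) : Decidable (Spec_getRulesHash rules out) := by unfold Spec_getRulesHash; infer_instance

-- ===== CLAIM (what is proved, stated in full; the proofs are below) =====
def Claim_equal_getRulesHash : Prop := ∀ (rules : List (String × List (String × List String))), Dom_getRulesHash rules → Pre_getRulesHash rules → Spec_getRulesHash rules (getRulesHash rules)

-- ===== LEMMAS AND PROOFS =====

-- A's loop body (insert-new / append-to-existing) is exactly Dict.modify with default []
theorem pvStepA_eq_modify (h : PySem.Dict String (List String)) (s : String) (i : String) :
    (if !(h.contains s) then h.insert s [i] else h.modify s [] (fun l => l ++ [i]))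
      = h.modify s [] (fun l => l ++ [i]) := by
  by_cases hc : h.contains s = true
  · simp [hc]
  · have hf : h.contains s = false := by simpa using hc
    simp [hf, PySem.Dict.modify, PySem.Dict.getD_of_not_contains h ([] : List String) hf]

theorem pvEq (rules : List (String × List (String × List String))) :
    getRulesHash rules = getRulesHash_alt rules := by
  unfold getRulesHash getRulesHash_alt
  have hA : (rules.foldl (fun rulesHash p =>
      let patternHash := pvSig p.2
      if !(rulesHash.contains patternHash) then rulesHash.insert patternHash [p.1]
      else rulesHash.modify patternHash [] (fun l => l ++ [p.1]))
      (PySem.Dict.empty : PySem.Dict String (List String)))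
      = (rules.map (fun p => (pvSig p.2, p.1))).foldl
          (fun d q => d.modify q.1 [] (fun l => l ++ [q.2])) PySem.Dict.empty := by
    rw [List.foldl_map]
    congr 1
    funext d p
    exact pvStepA_eq_modify d (pvSig p.2) p.1
  rw [hA]
  set ps := rules.map (fun p => (pvSig p.2, p.1)) with hps
  have hnodup : ((ps.foldl (fun d q => d.modify q.1 [] (fun l => l ++ [q.2]))
      (PySem.Dict.empty : PySem.Dict String (List String))).keys).Nodup := by
    exact PySem.Dict.nodup_keys_foldl_modify_key ps Prod.fst [] (fun _ q => fun l => l ++ [q.2]) _ (by simp [PySem.Dict.empty])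
  rw [PySem.Dict.items_eq_map_keys _ hnodup []]
  have hkeys : (ps.foldl (fun d q => d.modify q.1 [] (fun l => l ++ [q.2]))
      (PySem.Dict.empty : PySem.Dict String (List String))).keys
      = PySem.Set.update ([] : PySem.Set String) (ps.map Prod.fst) := by
    have := PySem.Dict.keys_foldl_modify_key ps Prod.fst ([] : List String) (fun _ q => fun l => l ++ [q.2]) PySem.Dict.empty
    simpa [PySem.Dict.empty] using this
  have hseen : ps.foldl (fun acc q => if acc.contains q.1 then acc else acc ++ [q.1]) ([] : List String)
      = PySem.Set.update ([] : PySem.Set String) (ps.map Prod.fst) := by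
    rw [PySem.Set.update_map_eq_foldl_add]
    rfl
  rw [hkeys]
  simp only [hseen]
  apply List.map_congr_left
  intro s _
  congr 1
  exact PySem.Dict.getD_foldl_modify_append ps PySem.Dict.empty s

-- ===== VERDICT (by name: the statement is the Claim_ definition above) =====
theorem getRulesHash_spec : Claim_equal_getRulesHash := by
  intro rules _ _
  unfold Spec_getRulesHash
  exact pvEq rules
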